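-- pv_equiv track=rewrite | github.com/ryanduldulao/EE199 | Fuzzy_APF_Ramp.py | createLoadSpike
-- ===== SOURCE A (Python) =====
-- def createLoadSpike(initial, final, length):
--     load = []
--     for x in range(length):
--         if x > 3:
--             load.append(final)
--         else:
--             load.append(initial)
--     return(load)
-- ===== SOURCE B (Python) =====
-- def createLoadSpike(initial, final, length):
--     # Two-block closed form: first min(4, length) entries are `initial`,
--     # the remaining max(0, length-4) entries are `final`.
--     return [initial] * min(4, length) + [final] * (length - 4)
-- ===== Notes on version B (the rewrite author's own statement) =====
-- stated objective: simpler
-- what changed: Replaces the per-element branched append loop with a closed-form two-block construction [initial]*min(4,length) + [final]*(length-4).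
import Mathlib
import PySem

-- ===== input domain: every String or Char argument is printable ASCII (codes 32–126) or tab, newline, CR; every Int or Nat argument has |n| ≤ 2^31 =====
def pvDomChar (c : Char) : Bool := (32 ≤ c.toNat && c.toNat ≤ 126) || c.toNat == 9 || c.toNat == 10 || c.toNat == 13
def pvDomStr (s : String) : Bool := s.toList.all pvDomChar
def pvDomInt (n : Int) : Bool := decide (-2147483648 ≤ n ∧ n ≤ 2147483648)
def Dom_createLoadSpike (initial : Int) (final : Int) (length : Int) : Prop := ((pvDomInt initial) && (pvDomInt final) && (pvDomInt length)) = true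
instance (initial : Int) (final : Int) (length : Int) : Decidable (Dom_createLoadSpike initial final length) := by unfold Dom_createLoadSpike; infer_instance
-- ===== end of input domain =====

-- B replaces A's per-element branched append loop by a closed-form two-block
-- construction (objective: simpler).

-- ===== PORT A =====
def createLoadSpike (initial : Int) (final : Int) (length : Int) : List Int :=
  (PySem.List.pyRange 0 length 1).foldl
    (fun load x => if x > 3 then load ++ [final] else load ++ [initial]) []

-- ===== PORT B =====
def createLoadSpike_alt (initial : Int) (final : Int) (length : Int) : List Int :=
  List.replicate (min 4 length).toNat initial ++ List.replicate (length - 4).toNat final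

-- ===== PRECONDITION & SPEC =====
def Spec_createLoadSpike (initial : Int) (final : Int) (length : Int) (out : List Int) : Prop := out = createLoadSpike_alt initial final length
instance (initial : Int) (final : Int) (length : Int) (out : List Int) : Decidable (Spec_createLoadSpike initial final length out) := by unfold Spec_createLoadSpike; infer_instance

-- ===== CLAIM (what is proved, stated in full; the proofs are below) =====
def Claim_equal_createLoadSpike : Prop := ∀ (initial : Int) (final : Int) (length : Int), Dom_createLoadSpike initial final length → Spec_createLoadSpike initial final length (createLoadSpike initial final length)

-- ===== LEMMAS AND PROOFS =====

theorem createLoadSpike_key (i f : Int) (n : Nat) :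
    List.foldl (fun load x => if x > 3 then load ++ [f] else load ++ [i]) []
      (List.map (fun k : Nat => (0 : Int) + ↑k) (List.range n))
    = List.replicate (min 4 n) i ++ List.replicate (n - 4) f := by
  induction n with
  | zero => simp
  | succ n ih =>
    rw [List.range_succ, List.map_append, List.foldl_append, ih]
    simp only [List.map_cons, List.map_nil, List.foldl_cons, List.foldl_nil]
    by_cases h : (3 : Int) < (0 : Int) + n
    · have hn : 4 ≤ n := by omega
      rw [if_pos h]
      have h1 : min 4 (n + 1) = 4 := by omega
      have h2 : min 4 n = 4 := by omega
      have h3 : n + 1 - 4 = (n - 4) + 1 := by omega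
      rw [h1, h2, h3]
      simp [List.replicate_succ']
    · have hn : n ≤ 3 := by omega
      rw [if_neg h]
      have h1 : min 4 (n + 1) = n + 1 := by omega
      have h2 : min 4 n = n := by omega
      have h3 : n + 1 - 4 = 0 := by omega
      have h4 : n - 4 = 0 := by omega
      rw [h1, h2, h3, h4]
      simp [List.replicate_succ']

-- ===== VERDICT (by name: the statement is the Claim_ definition above) =====
theorem createLoadSpike_spec : Claim_equal_createLoadSpike := by
  intro i f L _
  unfold Spec_createLoadSpike createLoadSpike createLoadSpike_alt
  rw [PySem.List.pyRange_one, sub_zero, createLoadSpike_key]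
  have h1 : (min 4 L).toNat = min 4 L.toNat := by omega
  have h2 : (L - 4).toNat = L.toNat - 4 := by omega
  rw [h1, h2]
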